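-- pv_equiv track=rewrite | github.com/Chalexz/Programacion-Ing.Computacion-AWing | Taller de programacion/Otros/Laboratorio5.py | valor_hexadecimal
-- ===== SOURCE A (Python) =====
-- def len_chino(lista): #copia de len porque ajá
--     # e: una lista
--     # s: la longitud de la lista
--     # r:
--     contador = 0
--     for w in lista:
--         contador += 1
--     return contador
--
-- def valor_hexadecimal(caracter):
--     # e: un caracter hexadecimal
--     # s: el valor decimal del caracter
--     # r: el caracter debe ser válido en hexa
--     hexa = ['0', '1', '2', '3', '4', '5', '6', '7', '8', '9', 'A', 'B', 'C', 'D', 'E', 'F']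
--     decimales = [0, 1, 2, 3, 4, 5, 6, 7, 8, 9, 10, 11, 12, 13, 14, 15]
--     if es_numero(caracter):
--         return caracter
--     for i in range(len_chino(hexa)):
--         if hexa[i] == caracter:
--             return decimales[i]
--     return -1
--
-- def es_numero(valor):
--     # e: un valor cualquiera
--     # s: verdadero si el valor es un número entre 0 y 9
--     # r: el valor debe ser un entero
--     if isinstance(valor, int):
--         return 0 <= valor <= 9
--     return False
-- ===== SOURCE B (Python) =====
-- def es_numero(valor):
--     if isinstance(valor, int):
--         return 0 <= valor <= 9
--     return False
--
-- def valor_hexadecimal(caracter):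
--     if es_numero(caracter):
--         return caracter
--     if isinstance(caracter, str) and len(caracter) == 1:
--         if '0' <= caracter <= '9':
--             return ord(caracter) - ord('0')
--         if 'A' <= caracter <= 'F':
--             return ord(caracter) - ord('A') + 10
--     return -1
-- ===== Notes on version B (the rewrite author's own statement) =====
-- stated objective: idiomatic
-- what changed: Replaces the parallel hexa/decimales lists and the hand-rolled linear scan (with a hand-written len) by direct positional arithmetic on the character code behind a single length-1 guard, splitting the digit range and the letter range.
import Mathlib
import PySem

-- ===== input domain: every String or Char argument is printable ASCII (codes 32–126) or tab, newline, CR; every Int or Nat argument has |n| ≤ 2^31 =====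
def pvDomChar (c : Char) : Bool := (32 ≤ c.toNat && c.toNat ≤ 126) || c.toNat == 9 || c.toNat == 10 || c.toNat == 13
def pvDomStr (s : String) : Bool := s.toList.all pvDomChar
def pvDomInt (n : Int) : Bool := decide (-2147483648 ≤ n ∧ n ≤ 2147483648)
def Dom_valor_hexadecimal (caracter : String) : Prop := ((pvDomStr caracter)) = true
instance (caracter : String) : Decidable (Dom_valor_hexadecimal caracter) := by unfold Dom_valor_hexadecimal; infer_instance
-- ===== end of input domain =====

-- B replaces A's parallel-list linear scan (with its hand-written len) by O(1) positional
-- arithmetic on the character code behind a length-1 guard (objective: idiomatic).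

-- ===== PORT A =====
-- es_numero: `isinstance(valor, int)` is False for a str argument, so on the String
-- domain this helper is constantly false (exact for str input).
def es_numero (_valor : String) : Bool := false

def len_chino (lista : List String) : Int :=
  lista.foldl (fun contador _ => contador + 1) 0

def pvHexa : List String :=
  ["0","1","2","3","4","5","6","7","8","9","A","B","C","D","E","F"]
def pvDecimales : List Int := [0,1,2,3,4,5,6,7,8,9,10,11,12,13,14,15]

-- the `for i in range(len_chino(hexa))` early-return loop of A; indices are in range,
-- so the `.getD` defaults are never used
def pvLoopA (caracter : String) : List Int → Int
  | [] => -1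
  | i :: rest =>
    if ((PySem.List.pyGet? pvHexa i).getD "") == caracter then
      (PySem.List.pyGet? pvDecimales i).getD 0
    else pvLoopA caracter rest

def valor_hexadecimal (caracter : String) : Int :=
  if es_numero caracter then 0  -- unreachable on a str argument: es_numero is false
  else pvLoopA caracter (PySem.List.pyRange 0 (len_chino pvHexa) 1)

-- ===== PORT B =====
-- Source B: es_numero(caracter) is False and isinstance(caracter, str) is True for a str,
-- so the port starts at the len==1 guard; `len(caracter) == 1` is the single-char match
def valor_hexadecimal_alt (caracter : String) : Int :=
  match caracter.toList with
  | [c] =>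
    if '0' ≤ c ∧ c ≤ '9' then (c.toNat : Int) - 48
    else if 'A' ≤ c ∧ c ≤ 'F' then (c.toNat : Int) - 65 + 10
    else -1
  | _ => -1

-- ===== PRECONDITION & SPEC =====
def Spec_valor_hexadecimal (caracter : String) (out : Int) : Prop := out = valor_hexadecimal_alt caracter
instance (caracter : String) (out : Int) : Decidable (Spec_valor_hexadecimal caracter out) := by unfold Spec_valor_hexadecimal; infer_instance

-- ===== CLAIM (what is proved, stated in full; the proofs are below) =====
def Claim_equal_valor_hexadecimal : Prop := ∀ (caracter : String), Dom_valor_hexadecimal caracter → Spec_valor_hexadecimal caracter (valor_hexadecimal caracter)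

-- ===== LEMMAS AND PROOFS =====

-- a string literal equals s iff their character lists agree
theorem pv_eq_toList (t s : String) : (t = s) ↔ (s.toList = t.toList) := by
  constructor
  · intro h; rw [h]
  · intro h
    have := congrArg String.ofList h
    simpa using this.symm

-- A's scan, fully unrolled into a character-list decision chain
theorem pv_loop_eq (s : String) :
    pvLoopA s (PySem.List.pyRange 0 (len_chino pvHexa) 1) =
      (if s.toList = ['0'] then 0 else if s.toList = ['1'] then 1 else if s.toList = ['2'] then 2 else if s.toList = ['3'] then 3 else if s.toList = ['4'] then 4 else if s.toList = ['5'] then 5 else if s.toList = ['6'] then 6 else if s.toList = ['7'] then 7 else if s.toList = ['8'] then 8 else if s.toList = ['9'] then 9 else if s.toList = ['A'] then 10 else if s.toList = ['B'] then 11 else if s.toList = ['C'] then 12 else if s.toList = ['D'] then 13 else if s.toList = ['E'] then 14 else if s.toList = ['F'] then 15 else (-1)) := by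
  have hr : PySem.List.pyRange 0 (len_chino pvHexa) 1 =
      [0,1,2,3,4,5,6,7,8,9,10,11,12,13,14,15] := by decide
  rw [hr]
  have ht0 : ("0" : String).toList = ['0'] := by decide
  have ht1 : ("1" : String).toList = ['1'] := by decide
  have ht2 : ("2" : String).toList = ['2'] := by decide
  have ht3 : ("3" : String).toList = ['3'] := by decide
  have ht4 : ("4" : String).toList = ['4'] := by decide
  have ht5 : ("5" : String).toList = ['5'] := by decide
  have ht6 : ("6" : String).toList = ['6'] := by decide
  have ht7 : ("7" : String).toList = ['7'] := by decide
  have ht8 : ("8" : String).toList = ['8'] := by decide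
  have ht9 : ("9" : String).toList = ['9'] := by decide
  have ht10 : ("A" : String).toList = ['A'] := by decide
  have ht11 : ("B" : String).toList = ['B'] := by decide
  have ht12 : ("C" : String).toList = ['C'] := by decide
  have ht13 : ("D" : String).toList = ['D'] := by decide
  have ht14 : ("E" : String).toList = ['E'] := by decide
  have ht15 : ("F" : String).toList = ['F'] := by decide
  have hn2 : Int.toNat 2 = 2 := rfl
  have hn3 : Int.toNat 3 = 3 := rfl
  have hn4 : Int.toNat 4 = 4 := rfl
  have hn5 : Int.toNat 5 = 5 := rfl
  have hn6 : Int.toNat 6 = 6 := rfl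
  have hn7 : Int.toNat 7 = 7 := rfl
  have hn8 : Int.toNat 8 = 8 := rfl
  have hn9 : Int.toNat 9 = 9 := rfl
  have hn10 : Int.toNat 10 = 10 := rfl
  have hn11 : Int.toNat 11 = 11 := rfl
  have hn12 : Int.toNat 12 = 12 := rfl
  have hn13 : Int.toNat 13 = 13 := rfl
  have hn14 : Int.toNat 14 = 14 := rfl
  have hn15 : Int.toNat 15 = 15 := rfl
  simp only [pvLoopA, pvHexa, pvDecimales, beq_iff_eq, pv_eq_toList]
  norm_num [PySem.List.pyGet?, PySem.List.pyIdx?, hn2, hn3, hn4, hn5, hn6, hn7, hn8, hn9, hn10, hn11, hn12, hn13, hn14, hn15, ht0, ht1, ht2, ht3, ht4, ht5, ht6, ht7, ht8, ht9, ht10, ht11, ht12, ht13, ht14, ht15]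

-- the single-character case, by exhausting the sixteen hex characters
theorem pv_char (c : Char) :
    valor_hexadecimal (String.ofList [c]) = valor_hexadecimal_alt (String.ofList [c]) := by
  by_cases h0 : c = '0'
  · subst h0; decide
  by_cases h1 : c = '1'
  · subst h1; decide
  by_cases h2 : c = '2'
  · subst h2; decide
  by_cases h3 : c = '3'
  · subst h3; decide
  by_cases h4 : c = '4'
  · subst h4; decide
  by_cases h5 : c = '5'
  · subst h5; decide
  by_cases h6 : c = '6'
  · subst h6; decide
  by_cases h7 : c = '7'
  · subst h7; decide
  by_cases h8 : c = '8'
  · subst h8; decide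
  by_cases h9 : c = '9'
  · subst h9; decide
  by_cases h10 : c = 'A'
  · subst h10; decide
  by_cases h11 : c = 'B'
  · subst h11; decide
  by_cases h12 : c = 'C'
  · subst h12; decide
  by_cases h13 : c = 'D'
  · subst h13; decide
  by_cases h14 : c = 'E'
  · subst h14; decide
  by_cases h15 : c = 'F'
  · subst h15; decide
  -- c is none of the sixteen hex characters: both sides return -1
  have n0 : c.toNat ≠ 48 := fun hn => h0 (Char.ext (UInt32.toNat_inj.mp hn))
  have n1 : c.toNat ≠ 49 := fun hn => h1 (Char.ext (UInt32.toNat_inj.mp hn))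
  have n2 : c.toNat ≠ 50 := fun hn => h2 (Char.ext (UInt32.toNat_inj.mp hn))
  have n3 : c.toNat ≠ 51 := fun hn => h3 (Char.ext (UInt32.toNat_inj.mp hn))
  have n4 : c.toNat ≠ 52 := fun hn => h4 (Char.ext (UInt32.toNat_inj.mp hn))
  have n5 : c.toNat ≠ 53 := fun hn => h5 (Char.ext (UInt32.toNat_inj.mp hn))
  have n6 : c.toNat ≠ 54 := fun hn => h6 (Char.ext (UInt32.toNat_inj.mp hn))
  have n7 : c.toNat ≠ 55 := fun hn => h7 (Char.ext (UInt32.toNat_inj.mp hn))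
  have n8 : c.toNat ≠ 56 := fun hn => h8 (Char.ext (UInt32.toNat_inj.mp hn))
  have n9 : c.toNat ≠ 57 := fun hn => h9 (Char.ext (UInt32.toNat_inj.mp hn))
  have n10 : c.toNat ≠ 65 := fun hn => h10 (Char.ext (UInt32.toNat_inj.mp hn))
  have n11 : c.toNat ≠ 66 := fun hn => h11 (Char.ext (UInt32.toNat_inj.mp hn))
  have n12 : c.toNat ≠ 67 := fun hn => h12 (Char.ext (UInt32.toNat_inj.mp hn))
  have n13 : c.toNat ≠ 68 := fun hn => h13 (Char.ext (UInt32.toNat_inj.mp hn))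
  have n14 : c.toNat ≠ 69 := fun hn => h14 (Char.ext (UInt32.toNat_inj.mp hn))
  have n15 : c.toNat ≠ 70 := fun hn => h15 (Char.ext (UInt32.toNat_inj.mp hn))
  rw [valor_hexadecimal, valor_hexadecimal_alt, pv_loop_eq]
  have hb1 : ('0' ≤ c ∧ c ≤ '9') ↔ (48 ≤ c.toNat ∧ c.toNat ≤ 57) := Iff.rfl
  have hb2 : ('A' ≤ c ∧ c ≤ 'F') ↔ (65 ≤ c.toNat ∧ c.toNat ≤ 70) := Iff.rfl
  simp only [es_numero, if_false, Bool.false_eq_true, String.toList_ofList,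
    List.cons.injEq, and_true, h0, h1, h2, h3, h4, h5, h6, h7, h8, h9, h10, h11, h12, h13, h14, h15, hb1, hb2]
  split_ifs with hA hB
  · omega
  · omega
  · rfl

theorem pv_main (caracter : String) :
    valor_hexadecimal caracter = valor_hexadecimal_alt caracter := by
  have hs : String.ofList caracter.toList = caracter := by simp
  rw [← hs]
  cases h : caracter.toList with
  | nil => decide
  | cons a l =>
    cases l with
    | nil => exact pv_char a
    | cons b l' =>
      rw [valor_hexadecimal, valor_hexadecimal_alt, pv_loop_eq]
      simp [es_numero]

-- ===== VERDICT (by name: the statement is the Claim_ definition above) =====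
theorem valor_hexadecimal_spec : Claim_equal_valor_hexadecimal := by
  intro c _
  show valor_hexadecimal c = valor_hexadecimal_alt c
  exact pv_main c
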